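-- pv_equiv track=rewrite | github.com/zzsfornlp/zmsp | msp2/tools/annotate/ann_semafor.py | map_span
-- ===== SOURCE A (Python) =====
-- from typing import List, Union, Dict
--
-- def map_span(widx: int, wlen: int, idx_map: Dict):
--     target_idxes = []
--     for i1 in range(widx, widx+wlen):
--         i2 = idx_map.get(i1)
--         if i2 is not None:
--             target_idxes.append(i2)
--     if len(target_idxes) == 0:
--         return None
--     min_v, max_v = min(target_idxes), max(target_idxes)
--     return (min_v, max_v-min_v+1)
-- ===== SOURCE B (Python) =====
-- def map_span(widx: int, wlen: int, idx_map):
--     min_v = None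
--     max_v = None
--     for k, v in idx_map.items():
--         if widx <= k < widx + wlen:
--             if min_v is None:
--                 min_v = v
--                 max_v = v
--             else:
--                 if v < min_v:
--                     min_v = v
--                 if v > max_v:
--                     max_v = v
--     if min_v is None:
--         return None
--     return (min_v, max_v - min_v + 1)
-- ===== Notes on version B (the rewrite author's own statement) =====
-- stated objective: alternative
-- what changed: B makes a single pass over the dict's entries, filtering keys into [widx, widx+wlen) and maintaining running min/max, instead of generating the wlen range indices, looking each up, collecting matches into a list and calling min/max on it; B's cost is O(len(idx_map)) independent of wlen.
import Mathlib
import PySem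

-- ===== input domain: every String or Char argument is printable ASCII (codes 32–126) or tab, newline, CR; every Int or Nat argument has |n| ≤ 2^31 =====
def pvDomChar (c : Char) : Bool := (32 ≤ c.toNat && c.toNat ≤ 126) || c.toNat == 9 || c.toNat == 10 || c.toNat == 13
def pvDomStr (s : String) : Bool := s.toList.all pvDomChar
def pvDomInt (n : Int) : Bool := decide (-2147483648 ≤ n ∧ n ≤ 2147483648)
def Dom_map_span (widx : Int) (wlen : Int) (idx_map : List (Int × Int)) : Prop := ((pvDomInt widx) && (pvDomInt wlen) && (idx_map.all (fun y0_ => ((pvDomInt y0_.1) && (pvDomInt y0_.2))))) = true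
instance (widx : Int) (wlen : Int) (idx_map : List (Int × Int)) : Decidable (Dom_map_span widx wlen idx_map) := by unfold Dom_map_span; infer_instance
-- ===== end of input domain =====

-- B iterates once over the dict's entries with a running min/max instead of
-- probing every index of range(widx, widx+wlen) and taking min/max of the collected list.

-- ===== PORT A =====
def map_span (widx : Int) (wlen : Int) (idx_map : List (Int × Int)) : Option (Int × Int) :=
  let target_idxes :=
    (PySem.List.pyRange widx (widx + wlen) 1).foldl
      (fun acc i1 =>
        match (PySem.Dict.mk idx_map).get? i1 with
        | some i2 => acc ++ [i2]
        | none => acc) []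
  if target_idxes.length = 0 then none
  else
    match PySem.List.min? target_idxes (fun y => y), PySem.List.max? target_idxes (fun y => y) with
    | some min_v, some max_v => some (min_v, max_v - min_v + 1)
    | _, _ => none

-- ===== PORT B =====
def map_span_alt (widx : Int) (wlen : Int) (idx_map : List (Int × Int)) : Option (Int × Int) :=
  let acc :=
    idx_map.foldl
      (fun (st : Option (Int × Int)) kv =>
        if widx ≤ kv.1 ∧ kv.1 < widx + wlen then
          match st with
          | none => some (kv.2, kv.2)
          | some (mn, mx) =>
              some ((if kv.2 < mn then kv.2 else mn), (if kv.2 > mx then kv.2 else mx))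
        else st) none
  match acc with
  | none => none
  | some (mn, mx) => some (mn, mx - mn + 1)

-- ===== PRECONDITION & SPEC =====
-- Pre_ excludes association lists with a duplicated key: a real Python dict cannot contain
-- one, so such lists are ambiguous representations on which first-match (A's lookup) and
-- iterate-all-pairs (B) semantics of the list may legitimately disagree.
def Pre_map_span (widx : Int) (wlen : Int) (idx_map : List (Int × Int)) : Prop :=
  (idx_map.map Prod.fst).Nodup
instance (widx : Int) (wlen : Int) (idx_map : List (Int × Int)) : Decidable (Pre_map_span widx wlen idx_map) := by unfold Pre_map_span; infer_instance

def pvWitness_map_span : Int × Int × (List (Int × Int)) := (0, 2, [(0, 3), (1, 5)])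

def Spec_map_span (widx : Int) (wlen : Int) (idx_map : List (Int × Int)) (out : Option (Int × Int)) : Prop := out = map_span_alt widx wlen idx_map
instance (widx : Int) (wlen : Int) (idx_map : List (Int × Int)) (out : Option (Int × Int)) : Decidable (Spec_map_span widx wlen idx_map out) := by unfold Spec_map_span; infer_instance

-- ===== CLAIM (what is proved, stated in full; the proofs are below) =====
def Claim_equal_map_span : Prop := ∀ (widx : Int) (wlen : Int) (idx_map : List (Int × Int)), Dom_map_span widx wlen idx_map → Pre_map_span widx wlen idx_map → Spec_map_span widx wlen idx_map (map_span widx wlen idx_map)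

-- ===== LEMMAS AND PROOFS =====

-- A's appending loop is a filterMap over the range.
theorem mapspan_foldl_filterMap (f : Int → Option Int) (l : List Int) (acc : List Int) :
    l.foldl (fun acc i => match f i with | some v => acc ++ [v] | none => acc) acc
      = acc ++ l.filterMap f := by
  induction l generalizing acc with
  | nil => simp
  | cons x t ih =>
      cases h : f x <;> simp [List.foldl_cons, h, ih]

-- first-match lookup in a nodup-key assoc list = membership
theorem mapspan_get?_mk_iff (l : List (Int × Int)) (hnd : (l.map Prod.fst).Nodup)
    (k v : Int) : (PySem.Dict.mk l).get? k = some v ↔ (k, v) ∈ l := by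
  induction l with
  | nil => simp [PySem.Dict.get?]
  | cons p t ih =>
      obtain ⟨pk, pv⟩ := p
      simp only [List.map_cons, List.nodup_cons] at hnd
      rw [PySem.Dict.get?_mk_cons]
      by_cases hk : pk = k
      · subst hk
        simp only [beq_self_eq_true, if_true, List.mem_cons]
        constructor
        · rintro h; exact Or.inl (by simpa using h.symm)
        · rintro (h | h)
          · simp [Prod.ext_iff] at h; simp [h]
          · exact absurd (List.mem_map_of_mem (f := Prod.fst) h) (by simpa using hnd.1)
      · have : (pk == k) = false := by simp [hk]
        simp only [this, Bool.false_eq_true, if_false, List.mem_cons]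
        rw [ih hnd.2]
        constructor
        · exact Or.inr
        · rintro (h | h)
          · exact absurd (congrArg Prod.fst h).symm hk
          · exact h

def mapspanStep : Option (Int × Int) → Int → Option (Int × Int) :=
  fun st v =>
    match st with
    | none => some (v, v)
    | some (mn, mx) => some ((if v < mn then v else mn), (if v > mx then v else mx))

-- B's loop is mapspanStep folded over the values of the in-range pairs.
theorem mapspan_alt_fold_eq (widx wlen : Int) (l : List (Int × Int)) (st : Option (Int × Int)) :
    l.foldl
      (fun (st : Option (Int × Int)) kv =>
        if widx ≤ kv.1 ∧ kv.1 < widx + wlen then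
          match st with
          | none => some (kv.2, kv.2)
          | some (mn, mx) =>
              some ((if kv.2 < mn then kv.2 else mn), (if kv.2 > mx then kv.2 else mx))
        else st) st
      = ((l.filter (fun kv => decide (widx ≤ kv.1) && decide (kv.1 < widx + wlen))).map Prod.snd).foldl mapspanStep st := by
  induction l generalizing st with
  | nil => rfl
  | cons p t ih =>
      by_cases hp : widx ≤ p.1 ∧ p.1 < widx + wlen
      · simp [List.foldl_cons, hp, List.filter_cons, ih, mapspanStep]
      · have : (decide (widx ≤ p.1) && decide (p.1 < widx + wlen)) = false := by
          simpa [Decidable.not_and_iff_or_not] using hp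
        simp only [List.foldl_cons, if_neg hp, List.filter_cons, this, Bool.false_eq_true,
          if_false, ih]

-- running min/max characterization
theorem mapspanStep_some (vs : List Int) (mn mx : Int) :
    ∃ mn' mx', vs.foldl mapspanStep (some (mn, mx)) = some (mn', mx')
      ∧ (mn' = mn ∨ mn' ∈ vs) ∧ mn' ≤ mn ∧ (∀ y ∈ vs, mn' ≤ y)
      ∧ (mx' = mx ∨ mx' ∈ vs) ∧ mx ≤ mx' ∧ (∀ y ∈ vs, y ≤ mx') := by
  induction vs generalizing mn mx with
  | nil => exact ⟨mn, mx, rfl, Or.inl rfl, le_refl mn, by simp, Or.inl rfl, le_refl mx, by simp⟩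
  | cons v t ih =>
      obtain ⟨mn', mx', heq, hmem, hle, hlb, hmem', hge, hub⟩ :=
        ih (if v < mn then v else mn) (if v > mx then v else mx)
      refine ⟨mn', mx', ?_, ?_, ?_, ?_, ?_, ?_, ?_⟩
      · simpa [mapspanStep] using heq
      · rcases hmem with h | h
        · subst h; split <;> simp_all
        · exact Or.inr (List.mem_cons_of_mem _ h)
      · refine le_trans hle ?_; split <;> omega
      · intro y hy
        rcases List.mem_cons.1 hy with rfl | hy
        · refine le_trans hle ?_; split <;> omega
        · exact hlb y hy
      · rcases hmem' with h | h
        · subst h; split <;> simp_all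
        · exact Or.inr (List.mem_cons_of_mem _ h)
      · refine le_trans ?_ hge; split <;> omega
      · intro y hy
        rcases List.mem_cons.1 hy with rfl | hy
        · refine le_trans ?_ hge; split <;> omega
        · exact hub y hy

theorem mapspanStep_none (vs : List Int) (hne : vs ≠ []) :
    ∃ mn mx, vs.foldl mapspanStep none = some (mn, mx)
      ∧ mn ∈ vs ∧ (∀ y ∈ vs, mn ≤ y) ∧ mx ∈ vs ∧ (∀ y ∈ vs, y ≤ mx) := by
  cases vs with
  | nil => exact absurd rfl hne
  | cons v t =>
      obtain ⟨mn, mx, heq, hmem, hle, hlb, hmem', hge, hub⟩ := mapspanStep_some t v v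
      refine ⟨mn, mx, by simpa [mapspanStep] using heq, ?_, ?_, ?_, ?_⟩
      · rcases hmem with h | h
        · exact h ▸ List.mem_cons_self
        · exact List.mem_cons_of_mem _ h
      · intro y hy
        rcases List.mem_cons.1 hy with rfl | hy
        · exact hle
        · exact hlb y hy
      · rcases hmem' with h | h
        · exact h ▸ List.mem_cons_self
        · exact List.mem_cons_of_mem _ h
      · intro y hy
        rcases List.mem_cons.1 hy with rfl | hy
        · exact hge
        · exact hub y hy

-- ===== VERDICT (by name: the statement is the Claim_ definition above) =====
theorem map_span_spec : Claim_equal_map_span := by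
  intro widx wlen idx_map _hdom hpre
  unfold Spec_map_span map_span map_span_alt
  set T : List Int :=
    (PySem.List.pyRange widx (widx + wlen) 1).foldl
      (fun acc i1 =>
        match (PySem.Dict.mk idx_map).get? i1 with
        | some i2 => acc ++ [i2]
        | none => acc) [] with hT
  have hTfm : T = (PySem.List.pyRange widx (widx + wlen) 1).filterMap
      (fun i => (PySem.Dict.mk idx_map).get? i) := by
    rw [hT, mapspan_foldl_filterMap]; simp
  set vs : List Int :=
    (idx_map.filter (fun kv => decide (widx ≤ kv.1) && decide (kv.1 < widx + wlen))).map Prod.snd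
    with hvs
  -- same members
  have hmemT : ∀ x, x ∈ T ↔ x ∈ vs := by
    intro x
    rw [hTfm, hvs, List.mem_filterMap]
    constructor
    · rintro ⟨i, hi, hget⟩
      rw [PySem.List.mem_pyRange_one] at hi
      have hmem := (mapspan_get?_mk_iff idx_map hpre i x).1 hget
      refine List.mem_map.2 ⟨(i, x), List.mem_filter.2 ⟨hmem, ?_⟩, rfl⟩
      simp [hi.1, hi.2]
    · intro hx
      obtain ⟨⟨k, v⟩, hkv, rfl⟩ := List.mem_map.1 hx
      obtain ⟨hmem, hrange⟩ := List.mem_filter.1 hkv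
      simp only [Bool.and_eq_true, decide_eq_true_eq] at hrange
      refine ⟨k, PySem.List.mem_pyRange_one.2 ⟨hrange.1, hrange.2⟩, ?_⟩
      exact (mapspan_get?_mk_iff idx_map hpre k v).2 hmem
  have hnil : T = [] ↔ vs = [] := by
    constructor <;> intro h <;>
      (apply List.eq_nil_iff_forall_not_mem.2; intro x hx) <;>
      [exact absurd ((hmemT x).2 hx) (by simp [h]); exact absurd ((hmemT x).1 hx) (by simp [h])]
  rw [mapspan_alt_fold_eq, ← hvs]
  by_cases hTe : T = []
  · have : vs = [] := hnil.1 hTe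
    simp [hTe, this, List.foldl_nil]
  · have hvne : vs ≠ [] := fun h => hTe (hnil.2 h)
    obtain ⟨mn, mx, heq, hmn, hlb, hmx, hub⟩ := mapspanStep_none vs hvne
    have hlen : ¬ T.length = 0 := by simpa [List.length_eq_zero_iff] using hTe
    obtain ⟨t0, ts, hTc⟩ := List.exists_cons_of_ne_nil hTe
    have hmin : PySem.List.min? T (fun y => y) = some (ts.foldl min t0) := by
      rw [hTc]; exact PySem.List.min?_id_cons ..
    have hmax : PySem.List.max? T (fun y => y) = some (ts.foldl max t0) := by
      rw [hTc]; exact PySem.List.max?_id_cons ..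
    -- identify the extrema via the shared member set
    have hminT_mem : ts.foldl min t0 ∈ T := by
      have := PySem.List.min?_mem (xs := T) (key := fun y => y) hmin; exact this
    have hminT_lb : ∀ y ∈ T, ts.foldl min t0 ≤ y := by
      intro y hy
      exact PySem.List.min?_isMin (xs := T) (key := fun y => y) hmin y hy
    have hmaxT_mem : ts.foldl max t0 ∈ T := by
      have := PySem.List.max?_mem (xs := T) (key := fun y => y) hmax; exact this
    have hmaxT_ub : ∀ y ∈ T, y ≤ ts.foldl max t0 := by
      intro y hy
      exact PySem.List.max?_isMax (xs := T) (key := fun y => y) hmax y hy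
    have hmn_eq : ts.foldl min t0 = mn :=
      le_antisymm (hminT_lb mn ((hmemT mn).2 hmn)) (hlb _ ((hmemT _).1 hminT_mem))
    have hmx_eq : ts.foldl max t0 = mx :=
      le_antisymm (hub _ ((hmemT _).1 hmaxT_mem)) (hmaxT_ub mx ((hmemT mx).2 hmx))
    simp [hlen, hmin, hmax, heq, hmn_eq, hmx_eq]
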